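-- pv_equiv track=rewrite | github.com/yordanovagabriela/HackBulgaria | week1/the_real_deal/prime_number_of_divisors.py | prime_number_of_divisors
-- ===== SOURCE A (Python) =====
-- def prime_number_of_divisors(n):
--     sum = 0
--     bool_p = True
-- #Finds the number of divisors
--     for i in range(1, n+1):
--         if n % i == 0:
--             sum = sum+1
-- #Checks if this number is prime
--     for i in range(2, sum):
--         if sum % i == 0:
--             bool_p = False
--             break
--         else:
--             bool_p = True
--     return bool_p
-- ===== SOURCE B (Python) =====
-- def prime_number_of_divisors(n):
--     # count divisors by pairing d with n // d, scanning only up to sqrt(n)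
--     d = 0
--     i = 1
--     while i * i <= n:
--         if n % i == 0:
--             d += 1 if i * i == n else 2
--         i += 1
--     # primality of the divisor count by trial division up to sqrt(d)
--     if d < 2:
--         return True
--     j = 2
--     while j * j <= d:
--         if d % j == 0:
--             return False
--         j += 1
--     return True
-- ===== Notes on version B (the rewrite author's own statement) =====
-- stated objective: faster
-- what changed: Counts divisors by pairing i with n//i while scanning only up to sqrt(n) (instead of testing every i in 1..n), and tests primality of the count only up to sqrt(count) with early return (instead of scanning all of 2..count-1).
import Mathlib
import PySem

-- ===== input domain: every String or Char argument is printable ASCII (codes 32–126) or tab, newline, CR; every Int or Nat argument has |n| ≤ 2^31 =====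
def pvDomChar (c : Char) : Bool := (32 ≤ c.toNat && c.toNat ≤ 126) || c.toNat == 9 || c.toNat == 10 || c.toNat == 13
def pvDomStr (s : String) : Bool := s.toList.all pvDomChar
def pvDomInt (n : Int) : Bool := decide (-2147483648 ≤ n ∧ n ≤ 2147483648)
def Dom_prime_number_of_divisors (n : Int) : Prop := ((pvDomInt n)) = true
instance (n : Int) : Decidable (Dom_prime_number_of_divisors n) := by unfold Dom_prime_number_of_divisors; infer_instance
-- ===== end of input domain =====

-- B is faster: it counts divisors by pairing i with n // i, scanning only up to sqrt(n),
-- and tests the count's primality only up to sqrt(count); A scans 1..n and then 2..count.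

-- ===== PORT A =====
-- the second loop of A: 'for i in range(2, sum): if sum % i == 0: bool_p = False; break; else: bool_p = True'
def pvAPrimeLoop (s : Int) : List Int → Bool → Bool
  | [], b => b
  | i :: rest, _ => if PySem.Int.mod s i == 0 then false else pvAPrimeLoop s rest true

def prime_number_of_divisors (n : Int) : Bool :=
  let s := (PySem.List.pyRange 1 (n + 1) 1).foldl
    (fun acc i => if PySem.Int.mod n i == 0 then acc + 1 else acc) 0
  pvAPrimeLoop s (PySem.List.pyRange 2 s 1) true

-- ===== PORT B =====
-- 'while i * i <= n: if n % i == 0: d += 1 if i*i == n else 2; i += 1'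
-- (the '1 ≤ i' conjunct only guards termination; the loop is always entered with i = 1)
def pvBCount (n i : Int) : Int :=
  if h : 1 ≤ i ∧ i * i ≤ n then
    (if PySem.Int.mod n i == 0 then (if i * i == n then 1 else 2) else 0) + pvBCount n (i + 1)
  else 0
termination_by (n + 1 - i).toNat
decreasing_by
  have h1 := h.1
  have h2 := h.2
  have hii : i ≤ i * i := by nlinarith
  omega

-- 'while j * j <= d: if d % j == 0: return False; j += 1' ('2 ≤ j' guards termination only)
def pvBPrime (d j : Int) : Bool :=
  if h : 2 ≤ j ∧ j * j ≤ d then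
    (if PySem.Int.mod d j == 0 then false else pvBPrime d (j + 1))
  else true
termination_by (d + 1 - j).toNat
decreasing_by
  have h1 := h.1
  have h2 := h.2
  have hjj : j ≤ j * j := by nlinarith
  omega

def prime_number_of_divisors_alt (n : Int) : Bool :=
  let d := pvBCount n 1
  if d < 2 then true else pvBPrime d 2

-- ===== PRECONDITION & SPEC =====
def Spec_prime_number_of_divisors (n : Int) (out : Bool) : Prop := out = prime_number_of_divisors_alt n
instance (n : Int) (out : Bool) : Decidable (Spec_prime_number_of_divisors n out) := by unfold Spec_prime_number_of_divisors; infer_instance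

-- ===== CLAIM (what is proved, stated in full; the proofs are below) =====
def Claim_equal_prime_number_of_divisors : Prop := ∀ (n : Int), Dom_prime_number_of_divisors n → Spec_prime_number_of_divisors n (prime_number_of_divisors n)

-- ===== LEMMAS AND PROOFS =====

-- the divisors of n in [1, n], as a Finset
def pvD (n : Int) : Finset Int :=
  ((PySem.List.pyRange 1 (n + 1) 1).filter (fun i => PySem.Int.mod n i == 0)).toFinset

lemma pvD_mem (n j : Int) : j ∈ pvD n ↔ 1 ≤ j ∧ j ≤ n ∧ j ∣ n := by
  simp only [pvD, List.mem_toFinset, List.mem_filter, PySem.List.mem_pyRange_one,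
    beq_iff_eq, PySem.Int.mod_eq_zero_iff_dvd]
  omega

-- divisors ≥ i whose square is ≤ n (the part the sqrt loop still has to visit)
def pvT (n i : Int) : Finset Int := (pvD n).filter (fun j => i ≤ j ∧ j * j ≤ n)

-- weight of a small divisor: itself plus its cofactor, counted once if they coincide
def pvW (n j : Int) : Int := if j * j = n then 1 else 2

lemma pvCountA_eq (n : Int) :
    ((PySem.List.pyRange 1 (n + 1) 1).foldl
      (fun acc i => if PySem.Int.mod n i == 0 then acc + 1 else acc) 0)
      = ((pvD n).card : Int) := by
  rw [PySem.List.foldl_if_add_one]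
  rw [List.countP_eq_length_filter]
  rw [pvD, List.toFinset_card_of_nodup (List.Nodup.filter _ (PySem.List.nodup_pyRange_one 1 (n+1)))]
  simp

lemma pvBCount_eq (n : Int) : ∀ (k : Nat) (i : Int), (n + 1 - i).toNat = k → 1 ≤ i →
    pvBCount n i = ∑ j ∈ pvT n i, pvW n j := by
  intro k
  induction k using Nat.strong_induction_on with
  | _ k ih =>
    intro i hk hi
    rw [pvBCount]
    split
    · rename_i h
      have hii : i ≤ i * i := by nlinarith
      have hin : i ≤ n := by omega
      have hrec : pvBCount n (i + 1) = ∑ j ∈ pvT n (i + 1), pvW n j :=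
        ih (n + 1 - (i + 1)).toNat (by omega) (i + 1) rfl (by omega)
      have hnotmem : i ∉ pvT n (i + 1) := by
        simp [pvT, pvD_mem]
      by_cases hd : i ∣ n
      · have hstep : pvT n i = insert i (pvT n (i + 1)) := by
          ext j
          simp only [pvT, Finset.mem_filter, pvD_mem, Finset.mem_insert]
          constructor
          · rintro ⟨⟨h1, h2, h3⟩, h4, h5⟩
            by_cases hji : j = i
            · exact Or.inl hji
            · exact Or.inr ⟨⟨h1, h2, h3⟩, by omega, h5⟩
          · rintro (rfl | ⟨⟨h1, h2, h3⟩, h4, h5⟩)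
            · exact ⟨⟨hi, hin, hd⟩, le_refl _, h.2⟩
            · exact ⟨⟨h1, h2, h3⟩, by omega, h5⟩
        rw [hstep, Finset.sum_insert hnotmem, hrec]
        have hmod : (PySem.Int.mod n i == 0) = true := by
          simp [PySem.Int.mod_eq_zero_iff_dvd, hd]
        rw [hmod, if_pos rfl]
        by_cases hsq : i * i = n <;> simp [hsq, pvW]
      · have hstep : pvT n i = pvT n (i + 1) := by
          ext j
          simp only [pvT, Finset.mem_filter, pvD_mem]
          constructor
          · rintro ⟨⟨h1, h2, h3⟩, h4, h5⟩
            refine ⟨⟨h1, h2, h3⟩, ?_, h5⟩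
            rcases lt_or_eq_of_le h4 with hlt | heq
            · omega
            · exact absurd (heq ▸ h3) hd
          · rintro ⟨⟨h1, h2, h3⟩, h4, h5⟩
            exact ⟨⟨h1, h2, h3⟩, by omega, h5⟩
        have hmod : (PySem.Int.mod n i == 0) = false := by
          simp [PySem.Int.mod_eq_zero_iff_dvd, hd]
        rw [hmod, if_neg Bool.false_ne_true, hstep, hrec]
        simp
    · rename_i h
      have hT : pvT n i = ∅ := by
        ext j
        simp only [pvT, Finset.mem_filter, pvD_mem, Finset.notMem_empty, iff_false]
        rintro ⟨⟨h1, h2, h3⟩, h4, h5⟩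
        have : i * i ≤ j * j := by nlinarith
        have : ¬ (i * i ≤ n) := fun hc => h ⟨hi, hc⟩
        omega
      rw [hT]
      simp

-- the pairing j ↦ n / j matches strictly-small divisors with big divisors
lemma pvCard_big_eq_small (n : Int) (hn : 1 ≤ n) :
    ((pvD n).filter (fun j => j * j < n)).card = ((pvD n).filter (fun j => ¬ j * j ≤ n)).card := by
  apply Finset.card_bij' (fun j _ => n / j) (fun e _ => n / e)
  · intro j hj
    simp only [Finset.mem_filter, pvD_mem] at hj ⊢
    obtain ⟨⟨h1, h2, h3⟩, h4⟩ := hj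
    have hj0 : j ≠ 0 := by omega
    have hmul : j * (n / j) = n := Int.mul_ediv_cancel' h3
    set e := n / j with he
    have hepos : 1 ≤ e := by nlinarith
    have hedvd : e ∣ n := ⟨j, by linarith [hmul]⟩
    have hele : e ≤ n := Int.le_of_dvd (by omega) hedvd
    have hjlt : j < e := by nlinarith
    refine ⟨⟨hepos, hele, hedvd⟩, ?_⟩
    nlinarith
  · intro e he
    simp only [Finset.mem_filter, pvD_mem] at he ⊢
    obtain ⟨⟨h1, h2, h3⟩, h4⟩ := he
    have he0 : e ≠ 0 := by omega
    have hmul : e * (n / e) = n := Int.mul_ediv_cancel' h3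
    set j := n / e with hj
    have hjpos : 1 ≤ j := by nlinarith
    have hjdvd : j ∣ n := ⟨e, by linarith [hmul]⟩
    have hjle : j ≤ n := Int.le_of_dvd (by omega) hjdvd
    have hjlt : j < e := by nlinarith
    refine ⟨⟨hjpos, hjle, hjdvd⟩, ?_⟩
    nlinarith
  · intro j hj
    simp only [Finset.mem_filter, pvD_mem] at hj
    obtain ⟨⟨h1, h2, h3⟩, h4⟩ := hj
    have hj0 : j ≠ 0 := by omega
    have hmul : j * (n / j) = n := Int.mul_ediv_cancel' h3
    calc n / (n / j) = (n / j) * j / (n / j) := by rw [mul_comm, hmul]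
    _ = j := Int.mul_ediv_cancel_left _ (by nlinarith)
  · intro e he
    simp only [Finset.mem_filter, pvD_mem] at he
    obtain ⟨⟨h1, h2, h3⟩, h4⟩ := he
    have he0 : e ≠ 0 := by omega
    have hmul : e * (n / e) = n := Int.mul_ediv_cancel' h3
    calc n / (n / e) = (n / e) * e / (n / e) := by rw [mul_comm, hmul]
    _ = e := Int.mul_ediv_cancel_left _ (by nlinarith)

lemma pvSum_weights (n : Int) (hn : 1 ≤ n) :
    (∑ j ∈ pvT n 1, pvW n j) = ((pvD n).card : Int) := by
  have hT1 : pvT n 1 = (pvD n).filter (fun j => j * j ≤ n) := by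
    ext j
    simp only [pvT, Finset.mem_filter, pvD_mem]
    omega
  have hsplit := Finset.filter_card_add_filter_neg_card_eq_card
    (s := pvD n) (p := fun j => j * j ≤ n)
  rw [hT1]
  have hw : ∀ j ∈ (pvD n).filter (fun j => j * j ≤ n),
      pvW n j = 1 + (if j * j < n then (1 : Int) else 0) := by
    intro j hj
    simp only [Finset.mem_filter] at hj
    unfold pvW
    by_cases hsq : j * j = n
    · simp [hsq]
    · have : j * j < n := lt_of_le_of_ne hj.2 hsq
      simp [hsq, this]
  rw [Finset.sum_congr rfl hw, Finset.sum_add_distrib, Finset.sum_const, Finset.sum_boole]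
  rw [Finset.filter_filter]
  have hff : (pvD n).filter (fun j => j * j ≤ n ∧ j * j < n) = (pvD n).filter (fun j => j * j < n) := by
    apply Finset.filter_congr
    intro j _
    constructor
    · exact fun h => h.2
    · exact fun h => ⟨le_of_lt h, h⟩
  rw [hff, pvCard_big_eq_small n hn]
  rw [← hsplit]
  push_cast
  ring

-- A's inner loop with break, characterised
lemma pvALoop_eq (s : Int) (l : List Int) :
    pvAPrimeLoop s l true = !(l.any (fun i => PySem.Int.mod s i == 0)) := by
  induction l with
  | nil => simp [pvAPrimeLoop]
  | cons x xs ih =>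
    rw [pvAPrimeLoop]
    by_cases hx : (PySem.Int.mod s x == 0) = true
    · simp [hx]
    · simp only [Bool.not_eq_true] at hx
      simp [hx, ih]

lemma pvAPrime_iff (d : Int) :
    (pvAPrimeLoop d (PySem.List.pyRange 2 d 1) true = true) ↔
      ∀ i : Int, 2 ≤ i → i < d → ¬ i ∣ d := by
  rw [pvALoop_eq]
  simp [PySem.List.mem_pyRange_one, PySem.Int.mod_eq_zero_iff_dvd]

lemma pvBPrime_iff (d : Int) : ∀ (k : Nat) (j : Int), (d + 1 - j).toNat = k → 2 ≤ j →
    (pvBPrime d j = true ↔ ∀ x : Int, j ≤ x → x * x ≤ d → ¬ x ∣ d) := by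
  intro k
  induction k using Nat.strong_induction_on with
  | _ k ih =>
    intro j hk hj
    rw [pvBPrime]
    split
    · rename_i h
      have hjj : j ≤ j * j := by nlinarith
      by_cases hd : j ∣ d
      · have hmod : (PySem.Int.mod d j == 0) = true := by
          simp [PySem.Int.mod_eq_zero_iff_dvd, hd]
        rw [hmod, if_pos rfl]
        exact iff_of_false (by simp) (fun hall => (hall j (le_refl _) h.2) hd)
      · have hmod : (PySem.Int.mod d j == 0) = false := by
          simp [PySem.Int.mod_eq_zero_iff_dvd, hd]
        rw [hmod, if_neg Bool.false_ne_true]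
        rw [ih (d + 1 - (j + 1)).toNat (by omega) (j + 1) rfl (by omega)]
        constructor
        · intro hall x hx1 hx2 hx3
          rcases lt_or_eq_of_le hx1 with hlt | heq
          · exact hall x (by omega) hx2 hx3
          · exact hd (heq ▸ hx3)
        · intro hall x hx1 hx2 hx3
          exact hall x (by omega) hx2 hx3
    · rename_i h
      simp only [true_iff]
      intro x hx1 hx2 hx3
      have : j * j ≤ x * x := by nlinarith
      exact h ⟨hj, by omega⟩

-- trial division up to sqrt is enough
lemma pvPrime_equiv (d : Int) (hd : 1 ≤ d) :
    (∀ i : Int, 2 ≤ i → i < d → ¬ i ∣ d) ↔ (∀ x : Int, 2 ≤ x → x * x ≤ d → ¬ x ∣ d) := by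
  constructor
  · intro hall x hx1 hx2 hx3
    have h2x : 2 * x ≤ x * x := by nlinarith
    exact hall x hx1 (by omega) hx3
  · intro hall i hi1 hi2 hi3
    have hi0 : i ≠ 0 := by omega
    have hmul : i * (d / i) = d := Int.mul_ediv_cancel' hi3
    set e := d / i with he
    have hepos : 1 ≤ e := by nlinarith
    have hene : e ≠ 1 := by
      intro h1
      rw [h1, mul_one] at hmul
      omega
    have he2 : 2 ≤ e := by omega
    by_cases hsq : i * i ≤ d
    · exact hall i hi1 hsq hi3
    · have hlt : e < i := by nlinarith
      have hee : e * e ≤ d := by nlinarith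
      exact hall e he2 hee ⟨i, by linarith [hmul]⟩

lemma pvCount_pos (n : Int) (hn : 1 ≤ n) : 1 ≤ ((pvD n).card : Int) := by
  have : n ∈ pvD n := (pvD_mem n n).mpr ⟨hn, le_refl _, dvd_refl _⟩
  have := Finset.card_pos.mpr ⟨n, this⟩
  omega

-- ===== VERDICT (by name: the statement is the Claim_ definition above) =====
theorem prime_number_of_divisors_spec : Claim_equal_prime_number_of_divisors := by
  intro n _
  unfold Spec_prime_number_of_divisors prime_number_of_divisors prime_number_of_divisors_alt
  by_cases hn : 1 ≤ n
  · have hcA := pvCountA_eq n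
    have hcB := pvBCount_eq n (n + 1 - 1).toNat 1 rfl (le_refl _)
    rw [pvSum_weights n hn] at hcB
    simp only [hcA, hcB]
    set d : Int := ((pvD n).card : Int) with hdd
    have hd1 : 1 ≤ d := pvCount_pos n hn
    by_cases hd2 : d < 2
    · have hempty : PySem.List.pyRange 2 d 1 = [] := PySem.List.pyRange_one_eq_nil (by omega)
      rw [hempty]
      simp [pvAPrimeLoop, hd2]
    · rw [if_neg hd2]
      rw [Bool.eq_iff_iff]
      rw [pvAPrime_iff d, pvBPrime_iff d (d + 1 - 2).toNat 2 rfl (le_refl _)]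
      exact pvPrime_equiv d hd1
  · have h1 : PySem.List.pyRange 1 (n + 1) 1 = [] := PySem.List.pyRange_one_eq_nil (by omega)
    have h2 : pvBCount n 1 = 0 := by
      rw [pvBCount]
      rw [dif_neg]
      simp only [one_mul, not_and]
      intro
      omega
    rw [h1, h2]
    simp [pvAPrimeLoop, PySem.List.pyRange_one_eq_nil (by omega : (0:Int) ≤ 2)]
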